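-- pv_equiv track=rewrite | github.com/benczech212/pizero_led_controller | code.py | wheel
-- ===== SOURCE A (Python) =====
-- def wheel(pos):
--     # Input a value 0 to 255 to get a color value.
--     # The colours are a transition r - g - b - back to r.
--     # if pos < 0 or pos > 255:
--     #     r = g = b = 0
--     while pos < 0:
--         pos += 255
--     pos %= 255
--     if pos < 85:
--         r = int(pos * 3)
--         g = int(255 - pos * 3)
--         b = 0
--     elif pos < 170:
--         pos -= 85
--         r = int(255 - pos * 3)
--         g = 0
--         b = int(pos * 3)
--     else:
--         pos -= 170
--         r = 0
--         g = int(pos * 3)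
--         b = int(255 - pos * 3)
--     return (r, g, b)
-- ===== SOURCE B (Python) =====
-- def wheel(pos):
--     t = 3 * (pos % 255)
--     return (max(0, 255 - abs(t - 255)),
--             max(0, 255 - t, t - 510),
--             max(0, 255 - abs(t - 510)))
-- ===== Notes on version B (the rewrite author's own statement) =====
-- stated objective: alternative
-- what changed: Drops the section decomposition entirely: instead of classifying the wrapped position into one of three equal segments and assigning per-segment ramps, B computes each RGB channel independently as a branch-free clamped triangle wave of the scaled position using max/abs arithmetic.
import Mathlib
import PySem

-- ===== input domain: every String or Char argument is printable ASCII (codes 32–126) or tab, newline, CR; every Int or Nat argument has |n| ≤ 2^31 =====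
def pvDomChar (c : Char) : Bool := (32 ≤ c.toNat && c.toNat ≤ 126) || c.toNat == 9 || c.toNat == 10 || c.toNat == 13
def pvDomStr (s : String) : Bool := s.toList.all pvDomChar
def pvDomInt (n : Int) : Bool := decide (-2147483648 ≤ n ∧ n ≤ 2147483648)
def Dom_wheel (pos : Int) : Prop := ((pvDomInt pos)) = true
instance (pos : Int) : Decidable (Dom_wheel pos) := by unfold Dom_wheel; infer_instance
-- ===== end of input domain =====

-- B is an alternative formulation: no segment classification at all — each channel is a
-- branch-free clamped triangle wave of 3*(pos % 255) built from max/abs; return value only.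

-- ===== PORT A =====
-- 'while pos < 0: pos += 255' — literal recursion, decreasing on (-pos).toNat
def wheelWhile (pos : Int) : Int :=
  if h : pos < 0 then wheelWhile (pos + 255) else pos
  termination_by (-pos).toNat
  decreasing_by omega

def wheel (pos : Int) : Int × Int × Int :=
  let pos := PySem.Int.mod (wheelWhile pos) 255
  if pos < 85 then
    (pos * 3, 255 - pos * 3, 0)
  else if pos < 170 then
    let pos := pos - 85
    (255 - pos * 3, 0, pos * 3)
  else
    let pos := pos - 170
    (0, pos * 3, 255 - pos * 3)

-- ===== PORT B =====
def wheel_alt (pos : Int) : Int × Int × Int :=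
  let t := 3 * PySem.Int.mod pos 255
  (max 0 (255 - |t - 255|),
   max 0 (max (255 - t) (t - 510)),
   max 0 (255 - |t - 510|))

-- ===== PRECONDITION & SPEC =====
def Spec_wheel (pos : Int) (out : Int × Int × Int) : Prop := out = wheel_alt pos
instance (pos : Int) (out : Int × Int × Int) : Decidable (Spec_wheel pos out) := by unfold Spec_wheel; infer_instance

-- ===== CLAIM (what is proved, stated in full; the proofs are below) =====
def Claim_equal_wheel : Prop := ∀ (pos : Int), Dom_wheel pos → Spec_wheel pos (wheel pos)

-- ===== LEMMAS AND PROOFS =====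

lemma wheelWhile_mod (pos : Int) : PySem.Int.mod (wheelWhile pos) 255 = PySem.Int.mod pos 255 := by
  unfold wheelWhile
  split
  · rw [wheelWhile_mod (pos + 255),
        PySem.Int.mod_eq_emod_of_pos (by norm_num : (0:Int) < 255),
        PySem.Int.mod_eq_emod_of_pos (by norm_num : (0:Int) < 255)]
    omega
  · rfl
  termination_by (-pos).toNat
  decreasing_by omega

-- ===== VERDICT (by name: the statement is the Claim_ definition above) =====
theorem wheel_spec : Claim_equal_wheel := by
  intro pos _
  show wheel pos = wheel_alt pos
  unfold wheel wheel_alt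
  rw [wheelWhile_mod]
  set p := PySem.Int.mod pos 255 with hp
  have h0 : 0 ≤ p := PySem.Int.mod_nonneg _ (by norm_num)
  have h1 : p < 255 := PySem.Int.mod_lt _ (by norm_num)
  dsimp only
  split_ifs with ha hb <;>
    simp only [Prod.mk.injEq, abs_eq_max_neg, max_def] <;>
    split_ifs <;> omega
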